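-- pv_equiv track=rewrite | github.com/selvankj/gsi | gsi/reports/report_generator.py | _html_vulns
-- ===== SOURCE A (Python) =====
-- from typing import List, Dict, Any
--
-- def _html_vulns(vulns: List[Dict]) -> str:
--     if not vulns:
--         return ""
--     sorted_vulns = sorted(vulns, key=lambda x: {"critical":0,"high":1,"medium":2,"low":3}.get(x.get("severity","low"),3))
--     rows = "".join(
--         f"<tr><td><span class='sev-badge sev-{v.get('severity','low')}'>{v.get('severity','').upper()}</span></td>"
--         f"<td>{v.get('package','')}</td><td><code>{v.get('version','')}</code></td>"
--         f"<td>{v.get('cve') or v.get('vuln_id','')}</td><td>{v.get('fixed_in') or '—'}</td></tr>"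
--         for v in sorted_vulns[:30]
--     )
--     return f"""<div class="section">
--   <div class="section-title">⚠️ Vulnerabilities ({len(vulns)})</div>
--   <table><tr><th>Severity</th><th>Package</th><th>Version</th><th>CVE</th><th>Fix</th></tr>{rows}</table>
-- </div>"""
-- ===== SOURCE B (Python) =====
-- def _html_vulns(vulns):
--     if not vulns:
--         return ""
--     # bucket (counting) sort by severity rank instead of sorted() with a key
--     buckets = [[], [], [], []]
--     for v in vulns:
--         sev = v.get("severity", "low")
--         if sev == "critical":
--             r = 0
--         elif sev == "high":
--             r = 1
--         elif sev == "medium":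
--             r = 2
--         else:
--             r = 3
--         buckets[r].append(v)
--     ordered = buckets[0] + buckets[1] + buckets[2] + buckets[3]
--     parts = []
--     for v in ordered[:30]:
--         cve = v.get("cve") or v.get("vuln_id", "")
--         fix = v.get("fixed_in") or "—"
--         parts.append(
--             "<tr><td><span class='sev-badge sev-" + v.get("severity", "low")
--             + "'>" + v.get("severity", "").upper() + "</span></td>"
--             + "<td>" + v.get("package", "") + "</td><td><code>" + v.get("version", "")
--             + "</code></td><td>" + cve + "</td><td>" + fix + "</td></tr>"
--         )
--     rows = "".join(parts)
--     return f"""<div class="section">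
--   <div class="section-title">⚠️ Vulnerabilities ({len(vulns)})</div>
--   <table><tr><th>Severity</th><th>Package</th><th>Version</th><th>CVE</th><th>Fix</th></tr>{rows}</table>
-- </div>"""
-- ===== Notes on version B (the rewrite author's own statement) =====
-- stated objective: alternative
-- what changed: Replaces sorted() with a severity-rank key by a single stable left-to-right pass that drops each vuln into one of four rank buckets (critical/high/medium/other) and concatenates them; the HTML row formatting is unchanged.
import Mathlib
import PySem

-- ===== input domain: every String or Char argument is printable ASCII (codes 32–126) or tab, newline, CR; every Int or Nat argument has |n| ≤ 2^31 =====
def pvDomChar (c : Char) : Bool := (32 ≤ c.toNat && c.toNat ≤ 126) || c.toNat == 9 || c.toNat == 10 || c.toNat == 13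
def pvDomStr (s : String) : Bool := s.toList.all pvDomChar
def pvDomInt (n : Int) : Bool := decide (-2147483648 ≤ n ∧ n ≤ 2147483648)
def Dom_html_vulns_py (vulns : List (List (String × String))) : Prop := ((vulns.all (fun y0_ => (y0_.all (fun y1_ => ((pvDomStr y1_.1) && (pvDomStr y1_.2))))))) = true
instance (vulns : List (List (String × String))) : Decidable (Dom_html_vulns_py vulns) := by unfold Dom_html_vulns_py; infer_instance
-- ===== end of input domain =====

-- B replaces A's sorted() with a severity-rank key by a single-pass 4-bucket (counting) sort; the row/HTML formatting is unchanged.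

-- shared helpers (identical formatting code in both Pythons): dict.get, one <tr> row, the surrounding HTML
-- v.get(k) on a dict[str,str]: first match in the association list (convention); v.get(k, d) adds the default
def pvGetD (v : List (String × String)) (k d : String) : String := (v.lookup k).getD d

-- one f-string row: exact transliteration of the (identical) row expression of Source A and Source B;
-- `x or y` on strings/None: falsy = none or ""
def pvRow (v : List (String × String)) : String :=
  let cve := match v.lookup "cve" with
    | some c => if c = "" then pvGetD v "vuln_id" "" else c
    | none => pvGetD v "vuln_id" ""
  let fix := match v.lookup "fixed_in" with
    | some f => if f = "" then "—" else f
    | none => "—"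
  "<tr><td><span class='sev-badge sev-" ++ pvGetD v "severity" "low" ++ "'>"
    ++ PySem.Str.upper (pvGetD v "severity" "") ++ "</span></td>"
    ++ "<td>" ++ pvGetD v "package" "" ++ "</td><td><code>" ++ pvGetD v "version" ""
    ++ "</code></td><td>" ++ cve ++ "</td><td>" ++ fix ++ "</td></tr>"

-- the surrounding triple-quoted f-string (shared verbatim by both Pythons)
def pvWrap (n : Int) (rows : String) : String :=
  "<div class=\"section\">\n  <div class=\"section-title\">⚠️ Vulnerabilities ("
    ++ PySem.Int.toStr n
    ++ ")</div>\n  <table><tr><th>Severity</th><th>Package</th><th>Version</th><th>CVE</th><th>Fix</th></tr>"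
    ++ rows ++ "</table>\n</div>"

-- ===== PORT A =====
def html_vulns_py (vulns : List (List (String × String))) : String :=
  if vulns = [] then ""
  else
    let sortedVulns := PySem.List.sorted vulns (fun x =>
      (PySem.Dict.ofList [("critical", (0 : Int)), ("high", 1), ("medium", 2), ("low", 3)]).getD
        (pvGetD x "severity" "low") 3) false
    -- sorted_vulns[:30] with nonnegative bound = take 30
    let rows := String.join ((sortedVulns.take 30).map pvRow)
    pvWrap (vulns.length : Int) rows

-- ===== PORT B =====
-- B-side helper: the if/elif severity-rank chain of Source B
def pvRank (v : List (String × String)) : Int :=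
  if pvGetD v "severity" "low" = "critical" then 0
  else if pvGetD v "severity" "low" = "high" then 1
  else if pvGetD v "severity" "low" = "medium" then 2 else 3

def html_vulns_py_alt (vulns : List (List (String × String))) : String :=
  if vulns = [] then ""
  else
    let bs := vulns.foldl (fun (b : List (List (String × String)) × List (List (String × String)) ×
        List (List (String × String)) × List (List (String × String))) v =>
      let r := pvRank v
      if r = 0 then (b.1 ++ [v], b.2.1, b.2.2.1, b.2.2.2)
      else if r = 1 then (b.1, b.2.1 ++ [v], b.2.2.1, b.2.2.2)
      else if r = 2 then (b.1, b.2.1, b.2.2.1 ++ [v], b.2.2.2)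
      else (b.1, b.2.1, b.2.2.1, b.2.2.2 ++ [v])) ([], [], [], [])
    let ordered := bs.1 ++ bs.2.1 ++ bs.2.2.1 ++ bs.2.2.2
    let rows := String.join ((ordered.take 30).map pvRow)
    pvWrap (vulns.length : Int) rows

-- ===== PRECONDITION & SPEC =====
def Spec_html_vulns_py (vulns : List (List (String × String))) (out : String) : Prop := out = html_vulns_py_alt vulns
instance (vulns : List (List (String × String))) (out : String) : Decidable (Spec_html_vulns_py vulns out) := by unfold Spec_html_vulns_py; infer_instance

-- ===== CLAIM (what is proved, stated in full; the proofs are below) =====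
def Claim_equal_html_vulns_py : Prop := ∀ (vulns : List (List (String × String))), Dom_html_vulns_py vulns → Spec_html_vulns_py vulns (html_vulns_py vulns)

-- ===== LEMMAS AND PROOFS =====

-- A's severity-rank dict literal lookup, as an if-chain on the looked-up string
theorem dictRank_eq (s : String) :
    (PySem.Dict.ofList [("critical", (0 : Int)), ("high", 1), ("medium", 2), ("low", 3)]).getD s 3
      = if s = "critical" then 0 else if s = "high" then 1 else if s = "medium" then 2 else 3 := by
  have h : PySem.Dict.ofList [("critical", (0 : Int)), ("high", 1), ("medium", 2), ("low", 3)]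
      = PySem.Dict.mk [("critical", (0 : Int)), ("high", 1), ("medium", 2), ("low", 3)] := by decide
  rw [h]
  simp only [PySem.Dict.getD, PySem.Dict.get?_mk_cons, beq_iff_eq]
  split_ifs with h1 h2 h3 <;> subst_vars <;> first | rfl | simp_all

-- hence A's rank key equals B's if/elif chain
theorem pvRank_eq (v : List (String × String)) :
    (PySem.Dict.ofList [("critical", (0 : Int)), ("high", 1), ("medium", 2), ("low", 3)]).getD
      (pvGetD v "severity" "low") 3 = pvRank v := by
  rw [dictRank_eq]; rfl

theorem pvRank_range (v : List (String × String)) : 0 ≤ pvRank v ∧ pvRank v ≤ 3 := by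
  unfold pvRank; split_ifs <;> omega

theorem insertBy_skip {α : Type} (before : α → α → Bool) (x : α) (l1 l2 : List α)
    (h : ∀ y ∈ l1, before x y = false) :
    PySem.List.insertBy before x (l1 ++ l2) = l1 ++ PySem.List.insertBy before x l2 := by
  induction l1 with
  | nil => rfl
  | cons y ys ih =>
    simp only [List.cons_append, PySem.List.insertBy, h y (by simp)]
    simp only [Bool.false_eq_true, if_false, List.cons.injEq, true_and]
    exact ih (fun z hz => h z (by simp [hz]))

theorem insertBy_front {α : Type} (before : α → α → Bool) (x : α) (l2 : List α)
    (h : ∀ y ∈ l2, before x y = true) :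
    PySem.List.insertBy before x l2 = x :: l2 := by
  cases l2 with
  | nil => rfl
  | cons y ys => simp [PySem.List.insertBy, h y (by simp)]

-- the stable insertion sort with a key taking values in {0,1,2,3} is the 4-bucket concatenation
theorem sorted_four {α : Type} (key : α → Int) (hk : ∀ a, 0 ≤ key a ∧ key a ≤ 3) (xs : List α) :
    PySem.List.sorted xs key false =
      xs.filter (fun a => key a == 0) ++ xs.filter (fun a => key a == 1)
        ++ xs.filter (fun a => key a == 2) ++ xs.filter (fun a => key a == 3) := by
  induction xs using List.reverseRecOn with
  | nil => rfl
  | append_singleton xs x ih =>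
    have hstep : PySem.List.sorted (xs ++ [x]) key false
        = PySem.List.insertBy (fun a b => decide (key a < key b)) x (PySem.List.sorted xs key false) := by
      simp [PySem.List.sorted, List.foldl_append]
    rw [hstep, ih]
    have hb : ∀ (i : Int) (y : α), y ∈ xs.filter (fun a => key a == i) → key y = i := by
      intro i y hy
      simpa using (List.mem_filter.mp hy).2
    have hx := hk x
    have hx4 : key x = 0 ∨ key x = 1 ∨ key x = 2 ∨ key x = 3 := by omega
    simp only [List.filter_append, List.filter_cons, List.filter_nil]
    rcases hx4 with h | h | h | h
    · -- rank 0: skip nothing before F0?  skip F0, insert before F1 ++ F2 ++ F3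
      rw [show xs.filter (fun a => key a == 0) ++ xs.filter (fun a => key a == 1)
            ++ xs.filter (fun a => key a == 2) ++ xs.filter (fun a => key a == 3)
          = xs.filter (fun a => key a == 0) ++ (xs.filter (fun a => key a == 1)
            ++ xs.filter (fun a => key a == 2) ++ xs.filter (fun a => key a == 3)) by
          simp [List.append_assoc]]
      rw [insertBy_skip _ x _ _ ?_, insertBy_front _ x _ ?_]
      · simp [h, List.append_assoc]
      · intro y hy
        simp only [List.append_assoc, List.mem_append] at hy
        rcases hy with hy | hy | hy <;>
          · have := hb _ _ hy; simp [h, this]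
      · intro y hy
        have := hb _ _ hy; simp [h, this]
    · -- rank 1: skip F0 ++ F1, insert before F2 ++ F3
      rw [show xs.filter (fun a => key a == 0) ++ xs.filter (fun a => key a == 1)
            ++ xs.filter (fun a => key a == 2) ++ xs.filter (fun a => key a == 3)
          = (xs.filter (fun a => key a == 0) ++ xs.filter (fun a => key a == 1))
            ++ (xs.filter (fun a => key a == 2) ++ xs.filter (fun a => key a == 3)) by
          simp [List.append_assoc]]
      rw [insertBy_skip _ x _ _ ?_, insertBy_front _ x _ ?_]
      · simp [h, List.append_assoc]
      · intro y hy
        simp only [List.mem_append] at hy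
        rcases hy with hy | hy <;>
          · have := hb _ _ hy; simp [h, this]
      · intro y hy
        simp only [List.mem_append] at hy
        rcases hy with hy | hy <;>
          · have := hb _ _ hy; simp [h, this]
    · -- rank 2: skip F0 ++ F1 ++ F2, insert before F3
      rw [show xs.filter (fun a => key a == 0) ++ xs.filter (fun a => key a == 1)
            ++ xs.filter (fun a => key a == 2) ++ xs.filter (fun a => key a == 3)
          = (xs.filter (fun a => key a == 0) ++ xs.filter (fun a => key a == 1)
            ++ xs.filter (fun a => key a == 2)) ++ xs.filter (fun a => key a == 3) from rfl]
      rw [insertBy_skip _ x _ _ ?_, insertBy_front _ x _ ?_]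
      · simp [h, List.append_assoc]
      · intro y hy
        have := hb _ _ hy; simp [h, this]
      · intro y hy
        simp only [List.mem_append] at hy
        rcases hy with (hy | hy) | hy <;>
          · have := hb _ _ hy; simp [h, this]
    · -- rank 3: skip everything, insert into []
      rw [show xs.filter (fun a => key a == 0) ++ xs.filter (fun a => key a == 1)
            ++ xs.filter (fun a => key a == 2) ++ xs.filter (fun a => key a == 3)
          = (xs.filter (fun a => key a == 0) ++ xs.filter (fun a => key a == 1)
            ++ xs.filter (fun a => key a == 2) ++ xs.filter (fun a => key a == 3)) ++ [] by simp]
      rw [insertBy_skip _ x _ _ ?_, insertBy_front _ x _ ?_]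
      · simp [h, List.append_assoc]
      · intro y hy
        simp at hy
      · intro y hy
        simp only [List.mem_append] at hy
        rcases hy with ((hy | hy) | hy) | hy <;>
          · have := hb _ _ hy; simp [h, this]

-- B's single bucket pass collects exactly the four rank filters
theorem bfold (xs : List (List (String × String)))
    (b0 b1 b2 b3 : List (List (String × String))) :
    xs.foldl (fun (b : List (List (String × String)) × List (List (String × String)) ×
        List (List (String × String)) × List (List (String × String))) v =>
      let r := pvRank v
      if r = 0 then (b.1 ++ [v], b.2.1, b.2.2.1, b.2.2.2)
      else if r = 1 then (b.1, b.2.1 ++ [v], b.2.2.1, b.2.2.2)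
      else if r = 2 then (b.1, b.2.1, b.2.2.1 ++ [v], b.2.2.2)
      else (b.1, b.2.1, b.2.2.1, b.2.2.2 ++ [v])) (b0, b1, b2, b3)
    = (b0 ++ xs.filter (fun a => pvRank a == 0), b1 ++ xs.filter (fun a => pvRank a == 1),
       b2 ++ xs.filter (fun a => pvRank a == 2), b3 ++ xs.filter (fun a => pvRank a == 3)) := by
  induction xs generalizing b0 b1 b2 b3 with
  | nil => simp
  | cons v vs ih =>
    have hv := pvRank_range v
    have h4 : pvRank v = 0 ∨ pvRank v = 1 ∨ pvRank v = 2 ∨ pvRank v = 3 := by omega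
    simp only [List.foldl_cons, List.filter_cons]
    rcases h4 with h | h | h | h <;>
      simp [h, ih, List.append_assoc]

-- ===== VERDICT (by name: the statement is the Claim_ definition above) =====
theorem html_vulns_py_spec : Claim_equal_html_vulns_py := by
  intro vulns _
  unfold Spec_html_vulns_py html_vulns_py html_vulns_py_alt
  by_cases hv : vulns = []
  · simp [hv]
  · simp only [hv, if_false]
    have hkey : (fun x => (PySem.Dict.ofList [("critical", (0 : Int)), ("high", 1), ("medium", 2), ("low", 3)]).getD
        (pvGetD x "severity" "low") 3) = pvRank := funext pvRank_eq
    rw [hkey, sorted_four pvRank pvRank_range, bfold]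
    simp [List.append_assoc]
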